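-- pv_equiv track=rewrite | github.com/scrla/AI2-THOR | main.py | build_dependency
-- ===== SOURCE A (Python) =====
-- from collections import defaultdict
-- from typing import List, Dict, Optional, Tuple, Set
--
-- def build_dependency(allocation: List[Tuple[int, Dict]]) -> Dict[int, List[int]]:
--     """작업 의존성 생성 (같은 chain의 작업은 순차적으로 실행)"""
--     dependencies = defaultdict(list)
--     chain_last_task = {}
--
--     for agent_id, task in allocation:
--         task_id = task["task_id"]
--         chain = task.get("chain", None)
--
--         if chain:
--             # 같은 체인의 이전 작업에 의존
--             if chain in chain_last_task:
--                 dependencies[task_id].append(chain_last_task[chain])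
--             chain_last_task[chain] = task_id
--
--     return dependencies
-- ===== SOURCE B (Python) =====
-- from collections import defaultdict
-- from typing import List, Dict, Tuple
--
--
-- def build_dependency(allocation: List[Tuple[int, Dict]]) -> Dict[int, List[int]]:
--     """Stateless re-implementation: for each chained task, its dependency is the
--     nearest earlier entry of the same chain, found by a backward scan."""
--     dependencies = defaultdict(list)
--     entries = [(t["task_id"], t.get("chain", None)) for _, t in allocation]
--     for j, (task_id, chain) in enumerate(entries):
--         if chain:
--             prev = next((ptid for ptid, pch in reversed(entries[:j]) if pch == chain), None)
--             if prev is not None: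
--                 dependencies[task_id].append(prev)
--     return dependencies
-- ===== Notes on version B (the rewrite author's own statement) =====
-- stated objective: alternative
-- what changed: Replaces A's stateful chain_last_task dict with a stateless backward scan: for each chained task the dependency is recomputed as the nearest earlier entry of the same chain.
import Mathlib
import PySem

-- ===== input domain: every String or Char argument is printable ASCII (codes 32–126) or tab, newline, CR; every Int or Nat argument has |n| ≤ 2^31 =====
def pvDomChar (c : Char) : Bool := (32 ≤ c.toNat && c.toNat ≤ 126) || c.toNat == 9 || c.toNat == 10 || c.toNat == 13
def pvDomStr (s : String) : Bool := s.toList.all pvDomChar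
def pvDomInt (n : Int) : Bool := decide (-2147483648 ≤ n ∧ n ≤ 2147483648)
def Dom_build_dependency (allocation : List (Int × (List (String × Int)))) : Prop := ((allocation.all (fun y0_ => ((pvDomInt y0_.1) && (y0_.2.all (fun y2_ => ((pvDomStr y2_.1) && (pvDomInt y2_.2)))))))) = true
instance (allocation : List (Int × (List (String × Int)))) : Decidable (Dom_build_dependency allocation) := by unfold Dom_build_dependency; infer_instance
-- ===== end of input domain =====

-- B replaces A's stateful chain_last_task dict with a stateless backward scan
-- (same return value; objective: alternative decomposition, not faster).


-- ===== PORT A =====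
-- the for-loop of A, as structural recursion over (dependencies, chain_last_task)
def buildLoopA (l : List (Int × (List (String × Int))))
    (deps : PySem.Dict Int (List Int)) (last : PySem.Dict Int Int) : PySem.Dict Int (List Int) :=
  match l with
  | [] => deps
  | p :: rest =>
    -- task["task_id"] raises KeyError when absent (excluded by Pre_); getD 0 here
    let tid : Int := (PySem.Dict.get? (PySem.Dict.mk p.2) "task_id").getD 0
    let chain : Option Int := PySem.Dict.get? (PySem.Dict.mk p.2) "chain"
    match chain with
    | some c =>
      if c ≠ 0 then
        let deps' := match PySem.Dict.get? last c with
          | some prev => deps.insert tid (deps.getD tid [] ++ [prev])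
          | none => deps
        buildLoopA rest deps' (last.insert c tid)
      else buildLoopA rest deps last
    | none => buildLoopA rest deps last

def build_dependency (allocation : List (Int × (List (String × Int)))) : List (Int × List Int) :=
  (buildLoopA allocation PySem.Dict.empty PySem.Dict.empty).items

-- ===== PORT B =====
-- B's precomputed entries list: (task_id, chain) per allocation entry
def entriesOf (allocation : List (Int × (List (String × Int)))) : List (Int × Option Int) :=
  allocation.map (fun p => ((PySem.Dict.get? (PySem.Dict.mk p.2) "task_id").getD 0,
                            PySem.Dict.get? (PySem.Dict.mk p.2) "chain"))

-- B's for-loop over enumerate(entries): pend is the remaining suffix, j its index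
def buildLoopB (entries pend : List (Int × Option Int)) (j : Nat)
    (deps : PySem.Dict Int (List Int)) : PySem.Dict Int (List Int) :=
  match pend with
  | [] => deps
  | (tid, chain) :: rest =>
    let deps' := match chain with
      | some c =>
        if c ≠ 0 then
          -- next((ptid for ptid, pch in reversed(entries[:j]) if pch == chain), None)
          match (entries.take j).reverse.find? (fun q => q.2 == some c) with
          | some q => deps.insert tid (deps.getD tid [] ++ [q.1])
          | none => deps
        else deps
      | none => deps
    buildLoopB entries rest (j + 1) deps'

def build_dependency_alt (allocation : List (Int × (List (String × Int)))) : List (Int × List Int) :=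
  let entries := entriesOf allocation
  (buildLoopB entries entries 0 PySem.Dict.empty).items

-- ===== PRECONDITION & SPEC =====
-- Pre_ excludes inputs where some task dict lacks the "task_id" key, on which Python A raises KeyError.
def Pre_build_dependency (allocation : List (Int × (List (String × Int)))) : Prop :=
  ∀ p ∈ allocation, (p.2.map Prod.fst).contains "task_id" = true
instance (allocation : List (Int × (List (String × Int)))) : Decidable (Pre_build_dependency allocation) := by unfold Pre_build_dependency; infer_instance

def pvWitness_build_dependency : (List (Int × (List (String × Int)))) :=
  [(0, [("task_id", 1), ("chain", 1)]), (1, [("task_id", 2), ("chain", 1)])]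

def Spec_build_dependency (allocation : List (Int × (List (String × Int)))) (out : List (Int × List Int)) : Prop := out = build_dependency_alt allocation
instance (allocation : List (Int × (List (String × Int)))) (out : List (Int × List Int)) : Decidable (Spec_build_dependency allocation out) := by unfold Spec_build_dependency; infer_instance

-- ===== CLAIM (what is proved, stated in full; the proofs are below) =====
def Claim_equal_build_dependency : Prop := ∀ (allocation : List (Int × (List (String × Int)))), Dom_build_dependency allocation → Pre_build_dependency allocation → Spec_build_dependency allocation (build_dependency allocation)

-- ===== LEMMAS AND PROOFS =====

-- the key step: both loops agree as long as chain_last_task is characterised by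
-- the backward scan over the already-processed prefix
lemma loop_eq (alloc : List (Int × (List (String × Int)))) :
    ∀ (suffix : List (Int × (List (String × Int)))) (j : Nat)
      (deps : PySem.Dict Int (List Int)) (last : PySem.Dict Int Int),
      alloc.drop j = suffix →
      (∀ c : Int, c ≠ 0 →
        PySem.Dict.get? last c =
          (((entriesOf alloc).take j).reverse.find? (fun q => q.2 == some c)).map Prod.fst) →
      buildLoopA suffix deps last = buildLoopB (entriesOf alloc) (entriesOf suffix) j deps := by
  intro suffix
  induction suffix with
  | nil => intro j deps last _ _; simp [buildLoopA, entriesOf, buildLoopB]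
  | cons p rest ih =>
    intro j deps last hdrop hinv
    have hget : alloc[j]? = some p := by
      have : (alloc.drop j)[0]? = some p := by rw [hdrop]; rfl
      simpa using this
    have htake : (entriesOf alloc).take (j + 1) =
        (entriesOf alloc).take j ++ [((PySem.Dict.get? (PySem.Dict.mk p.2) "task_id").getD 0,
                                       PySem.Dict.get? (PySem.Dict.mk p.2) "chain")] := by
      rw [List.take_add_one]
      simp [entriesOf, hget]
    have hdrop' : alloc.drop (j + 1) = rest := by
      rw [← List.drop_drop (i := 1) (j := j), hdrop]; rfl
    set tid : Int := (PySem.Dict.get? (PySem.Dict.mk p.2) "task_id").getD 0 with htid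
    set chain : Option Int := PySem.Dict.get? (PySem.Dict.mk p.2) "chain" with hchain
    show buildLoopA (p :: rest) deps last = buildLoopB (entriesOf alloc) (entriesOf (p :: rest)) j deps
    have hentcons : entriesOf (p :: rest) = (tid, chain) :: entriesOf rest := by
      simp [entriesOf, htid, hchain]
    rw [hentcons]
    match hch : chain with
    | none =>
      rw [buildLoopB]
      show buildLoopA (p :: rest) deps last = buildLoopB (entriesOf alloc) (entriesOf rest) (j + 1) deps
      rw [buildLoopA]
      simp only [← hchain]
      apply ih (j + 1) deps last hdrop'
      intro c hc
      rw [hinv c hc, htake]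
      simp
    | some c0 =>
      by_cases hc0 : c0 = 0
      · subst hc0
        rw [buildLoopB]
        show buildLoopA (p :: rest) deps last = buildLoopB (entriesOf alloc) (entriesOf rest) (j + 1) deps
        rw [buildLoopA]
        simp only [← hchain]
        simp only [ne_eq, not_true_eq_false, if_false]
        apply ih (j + 1) deps last hdrop'
        intro c hc
        rw [hinv c hc, htake, List.reverse_append]
        simp only [List.reverse_singleton, List.singleton_append]
        rw [List.find?_cons_of_neg (by simp only [beq_iff_eq, Option.some.injEq]; exact fun h => hc (Eq.symm h))]
      · -- active chain c0 ≠ 0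
        have hfind := hinv c0 hc0
        rw [buildLoopB, buildLoopA]
        simp only [← hchain]
        simp only [ne_eq, hc0, not_false_eq_true, if_true]
        have hdeps :
            (match PySem.Dict.get? last c0 with
              | some prev => deps.insert tid (deps.getD tid [] ++ [prev])
              | none => deps) =
            (match ((entriesOf alloc).take j).reverse.find? (fun q => q.2 == some c0) with
              | some q => deps.insert tid (deps.getD tid [] ++ [q.1])
              | none => deps) := by
          cases hf : ((entriesOf alloc).take j).reverse.find? (fun q => q.2 == some c0) with
          | none => rw [hf] at hfind; simp at hfind; rw [hfind]
          | some q => rw [hf] at hfind; simp at hfind; rw [hfind]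
        rw [hdeps]
        apply ih (j + 1) _ (last.insert c0 tid) hdrop'
        intro c hc
        rw [htake]
        by_cases hcc : c = c0
        · subst hcc
          rw [PySem.Dict.get?_insert_self]
          simp
        · rw [PySem.Dict.get?_insert_of_ne _ _ hcc, hinv c hc, List.reverse_append]
          simp only [List.reverse_singleton, List.singleton_append]
          rw [List.find?_cons_of_neg (by simp only [beq_iff_eq, Option.some.injEq]; exact fun h => hcc (Eq.symm h))]

-- ===== VERDICT (by name: the statement is the Claim_ definition above) =====
theorem build_dependency_spec : Claim_equal_build_dependency := by
  intro allocation _ _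
  unfold Spec_build_dependency build_dependency build_dependency_alt
  congr 1
  exact loop_eq allocation allocation 0 PySem.Dict.empty PySem.Dict.empty rfl
    (by intro c hc; simp [PySem.Dict.get?_empty, entriesOf])
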